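-- pv_equiv track=rewrite | github.com/hariss-iqbal/shop-app | frontend/scripts/convert-inject-to-constructor.py | extract_ctor_body_lines
-- ===== SOURCE A (Python) =====
-- def extract_ctor_body_lines(lines, ctor_start, ctor_end):
--     """Extract constructor body lines (between { and })."""
--     full = '\n'.join(lines[ctor_start:ctor_end + 1])
--
--     # Find { after closing paren
--     paren_depth = 0
--     brace_pos = None
--     for i, c in enumerate(full):
--         if c == '(':
--             paren_depth += 1
--         elif c == ')':
--             paren_depth -= 1
--         elif c == '{' and paren_depth == 0:
--             brace_pos = i
--             break
--
--     if brace_pos is None: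
--         return []
--
--     # Find matching }
--     depth = 0
--     end_pos = None
--     for i in range(brace_pos, len(full)):
--         if full[i] == '{':
--             depth += 1
--         elif full[i] == '}':
--             depth -= 1
--             if depth == 0:
--                 end_pos = i
--                 break
--
--     if end_pos is None:
--         return []
--
--     body = full[brace_pos + 1:end_pos]
--     body_lines = body.split('\n')
--
--     # Trim leading/trailing empty lines
--     while body_lines and not body_lines[0].strip():
--         body_lines.pop(0)
--     while body_lines and not body_lines[-1].strip():
--         body_lines.pop()
--
--     return body_lines
-- ===== SOURCE B (Python) =====
-- def extract_ctor_body_lines(lines, ctor_start, ctor_end):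
--     """Extract constructor body lines (between { and })."""
--     full = '\n'.join(lines[ctor_start:ctor_end + 1])
--
--     # Materialize depth profiles up front: pd[i] = paren depth before full[i],
--     # bd[i] = brace balance of full[:i].
--     pd = [0]
--     for c in full:
--         pd.append(pd[-1] + (c == '(') - (c == ')'))
--     bd = [0]
--     for c in full:
--         bd.append(bd[-1] + (c == '{') - (c == '}'))
--
--     brace_pos = next((i for i, (c, d) in enumerate(zip(full, pd)) if c == '{' and d == 0), None)
--     if brace_pos is None:
--         return []
--
--     # matching '}' = first position where the brace balance returns to its pre-'{' level
--     end_pos = next((i for i, d in enumerate(bd[brace_pos + 1:], brace_pos) if d == bd[brace_pos]), None)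
--     if end_pos is None:
--         return []
--
--     body_lines = full[brace_pos + 1:end_pos].split('\n')
--     nonblank = [i for i, ln in enumerate(body_lines) if ln.strip()]
--     if not nonblank:
--         return []
--     return body_lines[nonblank[0]:nonblank[-1] + 1]
-- ===== Notes on version B (the rewrite author's own statement) =====
-- stated objective: alternative
-- what changed: B replaces A's stateful break-out scans with materialized data: it precomputes paren-depth and brace-balance prefix arrays once, finds the opening brace as the first index whose (char, depth) pair matches, finds the matching brace as the first later position where the brace balance returns to its pre-'{' level (no second depth-counting loop), and trims blank lines by collecting the list of non-blank line indices and slicing from its first to its last element instead of popping.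
import Mathlib
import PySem

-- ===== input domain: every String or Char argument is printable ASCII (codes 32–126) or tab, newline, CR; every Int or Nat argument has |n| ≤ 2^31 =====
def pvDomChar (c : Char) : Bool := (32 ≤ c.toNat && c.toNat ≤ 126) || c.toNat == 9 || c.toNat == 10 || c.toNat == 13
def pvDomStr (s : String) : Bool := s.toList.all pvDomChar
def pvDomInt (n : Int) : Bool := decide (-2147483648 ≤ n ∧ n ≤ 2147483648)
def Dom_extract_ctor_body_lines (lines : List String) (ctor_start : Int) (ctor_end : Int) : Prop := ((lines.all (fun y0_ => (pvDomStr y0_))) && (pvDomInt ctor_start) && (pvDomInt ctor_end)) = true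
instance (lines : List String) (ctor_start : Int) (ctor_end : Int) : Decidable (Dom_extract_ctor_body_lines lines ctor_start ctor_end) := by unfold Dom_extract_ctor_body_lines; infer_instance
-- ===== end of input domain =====

-- B precomputes paren-depth / brace-balance prefix arrays and turns both searches into
-- first-index lookups against them, trimming blank lines via the list of non-blank
-- indices and one slice (objective: alternative).

-- shared helper: Python's `not s.strip()` on a line
def pvIsBlank (s : String) : Bool := PySem.Str.strip s == ""

-- ===== PORT A =====
-- A's first loop: for i, c in enumerate(full): track paren depth, break at '{' when depth 0
def pvFindBraceA : List Char → Nat → Int → Option Nat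
  | [], _, _ => none
  | c :: rest, i, pd =>
    if c = '(' then pvFindBraceA rest (i + 1) (pd + 1)
    else if c = ')' then pvFindBraceA rest (i + 1) (pd - 1)
    else if c = '{' ∧ pd = 0 then some i
    else pvFindBraceA rest (i + 1) pd

-- A's second loop: for i in range(brace_pos, len(full)), over the suffix, counting braces
def pvFindCloseA : List Char → Nat → Int → Option Nat
  | [], _, _ => none
  | c :: rest, i, depth =>
    if c = '{' then pvFindCloseA rest (i + 1) (depth + 1)
    else if c = '}' then
      if depth - 1 = 0 then some i else pvFindCloseA rest (i + 1) (depth - 1)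
    else pvFindCloseA rest (i + 1) depth

-- while body_lines and not body_lines[0].strip(): body_lines.pop(0)
def pvTrimFrontA : List String → List String
  | [] => []
  | s :: rest => if pvIsBlank s then pvTrimFrontA rest else s :: rest

-- while body_lines and not body_lines[-1].strip(): body_lines.pop()
def pvTrimBackA (xs : List String) : List String :=
  if h : xs ≠ [] ∧ pvIsBlank (xs.getLast?.getD "") then pvTrimBackA xs.dropLast else xs
termination_by xs.length
decreasing_by
  have := List.length_pos_of_ne_nil h.1
  simp [List.length_dropLast]; omega

def extract_ctor_body_lines (lines : List String) (ctor_start : Int) (ctor_end : Int) : List String :=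
  let full := PySem.Str.join "\n" (PySem.List.slice lines (some ctor_start) (some (ctor_end + 1)))
  let cs := full.toList
  match pvFindBraceA cs 0 0 with
  | none => []
  | some bp =>
    match pvFindCloseA (cs.drop bp) bp 0 with
    | none => []
    | some ep =>
      let body := PySem.List.slice cs (some ((bp : Int) + 1)) (some (ep : Int))
      let bodyLines := (PySem.Chars.splitOn body ['\n']).map String.ofList
      pvTrimBackA (pvTrimFrontA bodyLines)

-- ===== PORT B =====
-- pd = [0]; for c in full: pd.append(pd[-1] + (c=='(') - (c==')'))   (tail after the initial 0)
def pvPdTail : List Char → Int → List Int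
  | [], _ => []
  | c :: rest, p =>
    let p' := p + (if c = '(' then 1 else 0) - (if c = ')' then 1 else 0)
    p' :: pvPdTail rest p'

-- bd = [0]; for c in full: bd.append(bd[-1] + (c=='{') - (c=='}'))   (tail after the initial 0)
def pvBdTail : List Char → Int → List Int
  | [], _ => []
  | c :: rest, b =>
    let b' := b + (if c = '{' then 1 else 0) - (if c = '}' then 1 else 0)
    b' :: pvBdTail rest b'

-- next((i for i,(c,d) in enumerate(zip(full, pd)) if c=='{' and d==0), None)
def pvFindBraceB : List (Char × Int) → Nat → Option Nat
  | [], _ => none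
  | (c, d) :: rest, i => if c = '{' ∧ d = 0 then some i else pvFindBraceB rest (i + 1)

-- next((i for i,d in enumerate(bd[brace_pos+1:], brace_pos) if d == target), None)
def pvFindEqB (target : Int) : List Int → Nat → Option Nat
  | [], _ => none
  | d :: rest, i => if d = target then some i else pvFindEqB target rest (i + 1)

-- nonblank = [i for i, ln in enumerate(body_lines) if ln.strip()]  (start generalized for the proof;
-- the port calls it with start 0, Python's enumerate default)
def pvNb (L : List String) (s : Int) : List Int :=
  ((PySem.List.enumerate L s).filter (fun p => !(pvIsBlank p.2))).map (·.1)

def extract_ctor_body_lines_alt (lines : List String) (ctor_start : Int) (ctor_end : Int) : List String :=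
  let full := PySem.Str.join "\n" (PySem.List.slice lines (some ctor_start) (some (ctor_end + 1)))
  let cs := full.toList
  let pd := (0 : Int) :: pvPdTail cs 0
  let bd := (0 : Int) :: pvBdTail cs 0
  match pvFindBraceB (cs.zip pd) 0 with
  | none => []
  | some bp =>
    -- bd[brace_pos] (always in range) and bd[brace_pos+1:] (nonnegative-index slice)
    match pvFindEqB (bd.getD bp 0) (bd.drop (bp + 1)) bp with
    | none => []
    | some ep =>
      let bodyLines := (PySem.Chars.splitOn (PySem.List.slice cs (some ((bp : Int) + 1)) (some (ep : Int))) ['\n']).map String.ofList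
      match pvNb bodyLines 0 with
      | [] => []
      | i0 :: rest =>
        PySem.List.slice bodyLines (some i0) (some ((i0 :: rest).getLast (List.cons_ne_nil _ _) + 1))

-- ===== PRECONDITION & SPEC =====
def Spec_extract_ctor_body_lines (lines : List String) (ctor_start : Int) (ctor_end : Int) (out : List String) : Prop := out = extract_ctor_body_lines_alt lines ctor_start ctor_end
instance (lines : List String) (ctor_start : Int) (ctor_end : Int) (out : List String) : Decidable (Spec_extract_ctor_body_lines lines ctor_start ctor_end out) := by unfold Spec_extract_ctor_body_lines; infer_instance

-- ===== CLAIM (what is proved, stated in full; the proofs are below) =====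
def Claim_equal_extract_ctor_body_lines : Prop := ∀ (lines : List String) (ctor_start : Int) (ctor_end : Int), Dom_extract_ctor_body_lines lines ctor_start ctor_end → Spec_extract_ctor_body_lines lines ctor_start ctor_end (extract_ctor_body_lines lines ctor_start ctor_end)

-- ===== LEMMAS AND PROOFS =====

theorem pvFindBraceB_eq (cs : List Char) (i : Nat) (pd : Int) :
    pvFindBraceB (cs.zip (pd :: pvPdTail cs pd)) i = pvFindBraceA cs i pd := by
  induction cs generalizing i pd with
  | nil => simp [pvFindBraceB, pvFindBraceA]
  | cons c rest ih =>
    simp only [pvPdTail, List.zip_cons_cons, pvFindBraceB, pvFindBraceA]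
    by_cases hb : c = '{' ∧ pd = 0
    · rw [if_pos hb, if_neg (by rintro rfl; exact absurd hb.1 (by decide)),
        if_neg (by rintro rfl; exact absurd hb.1 (by decide)), if_pos hb]
    · rw [if_neg hb]
      by_cases h1 : c = '('
      · subst h1
        simp only [Char.reduceEq, reduceIte]
        rw [show pd + 1 - (0:Int) = pd + 1 from by ring]
        exact ih _ _
      · by_cases h2 : c = ')'
        · subst h2
          simp only [Char.reduceEq, reduceIte]
          rw [show pd + 0 - (1:Int) = pd - 1 from by ring]
          exact ih _ _
        · rw [if_neg h1, if_neg h2, if_neg hb, if_neg h1, if_neg h2]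
          rw [show pd + 0 - (0:Int) = pd from by ring]
          exact ih _ _

theorem pvFindBraceA_drop (cs : List Char) (i : Nat) (pd : Int) (bp : Nat)
    (h : pvFindBraceA cs i pd = some bp) :
    i ≤ bp ∧ cs.drop (bp - i) = '{' :: cs.drop (bp - i + 1) := by
  induction cs generalizing i pd with
  | nil => simp [pvFindBraceA] at h
  | cons c rest ih =>
    simp only [pvFindBraceA] at h
    split_ifs at h with h1 h2 h3
    · obtain ⟨hle, hdrop⟩ := ih _ _ h
      refine ⟨by omega, ?_⟩
      rw [show bp - i = (bp - (i+1)) + 1 from by omega, List.drop_succ_cons,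
        show bp - (i+1) + 1 + 1 = (bp - (i+1) + 1) + 1 from rfl, List.drop_succ_cons]
      exact hdrop
    · obtain ⟨hle, hdrop⟩ := ih _ _ h
      refine ⟨by omega, ?_⟩
      rw [show bp - i = (bp - (i+1)) + 1 from by omega, List.drop_succ_cons,
        show bp - (i+1) + 1 + 1 = (bp - (i+1) + 1) + 1 from rfl, List.drop_succ_cons]
      exact hdrop
    · obtain rfl := Option.some.inj h
      refine ⟨le_refl _, ?_⟩
      simp [h3.1]
    · obtain ⟨hle, hdrop⟩ := ih _ _ h
      refine ⟨by omega, ?_⟩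
      rw [show bp - i = (bp - (i+1)) + 1 from by omega, List.drop_succ_cons,
        show bp - (i+1) + 1 + 1 = (bp - (i+1) + 1) + 1 from rfl, List.drop_succ_cons]
      exact hdrop
theorem pvFindEqB_eq (cs : List Char) (i : Nat) (depth b : Int) (hd : 1 ≤ depth) :
    pvFindEqB (b - depth) (pvBdTail cs b) i = pvFindCloseA cs i depth := by
  induction cs generalizing i depth b with
  | nil => simp [pvFindEqB, pvBdTail, pvFindCloseA]
  | cons c rest ih =>
    simp only [pvBdTail, pvFindEqB, pvFindCloseA]
    by_cases h1 : c = '{'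
    · subst h1
      simp only [Char.reduceEq, reduceIte]
      rw [if_neg (show ¬(b + 1 - (0:Int) = b - depth) by omega),
        show b + 1 - (0:Int) = b + 1 from by ring,
        show b - depth = (b + 1) - (depth + 1) from by ring]
      exact ih _ _ _ (by omega)
    · by_cases h2 : c = '}'
      · subst h2
        simp only [Char.reduceEq, reduceIte]
        rw [show b + 0 - (1:Int) = b - 1 from by ring]
        by_cases h3 : depth - 1 = 0
        · rw [if_pos (by omega), if_pos h3]
        · rw [if_neg (by omega), if_neg h3,
            show b - depth = (b - 1) - (depth - 1) from by ring]
          exact ih _ _ _ (by omega)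
      · rw [if_neg h1, if_neg h2, if_neg h1, if_neg h2,
          show b + 0 - (0:Int) = b from by ring,
          if_neg (show ¬(b = b - depth) by omega)]
        exact ih _ _ _ hd

theorem pvBdTail_drop (cs : List Char) (b : Int) (bp : Nat) (hbp : bp ≤ cs.length) :
    ∃ b', (b :: pvBdTail cs b).drop bp = b' :: pvBdTail (cs.drop bp) b' := by
  induction cs generalizing b bp with
  | nil =>
    have : bp = 0 := by simpa using hbp
    subst this; exact ⟨b, rfl⟩
  | cons c rest ih =>
    cases bp with
    | zero => exact ⟨b, rfl⟩
    | succ k =>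
      simp only [pvBdTail, List.drop_succ_cons]
      exact ih _ k (by simpa using hbp)
-- A's pop(0) loop is dropWhile
theorem pvTrimFrontA_eq (xs : List String) : pvTrimFrontA xs = xs.dropWhile pvIsBlank := by
  induction xs with
  | nil => simp [pvTrimFrontA]
  | cons s rest ih =>
    by_cases h : pvIsBlank s <;> simp [pvTrimFrontA, List.dropWhile, h, ih]

-- A's pop() loop is rdropWhile
theorem pvTrimBackA_eq (xs : List String) : pvTrimBackA xs = xs.rdropWhile pvIsBlank := by
  induction xs using List.reverseRecOn with
  | nil => rw [pvTrimBackA]; simp [List.rdropWhile_nil]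
  | append_singleton ys a ih =>
    rw [pvTrimBackA]
    simp only [List.getLast?_concat, List.dropLast_concat]
    by_cases h : pvIsBlank a
    · have hcond : ys ++ [a] ≠ [] ∧ pvIsBlank ((some a).getD "") = true :=
        ⟨by simp, by simpa using h⟩
      rw [dif_pos hcond, ih, List.rdropWhile_concat, if_pos h]
    · have hcond : ¬(ys ++ [a] ≠ [] ∧ pvIsBlank ((some a).getD "") = true) := by simp [h]
      rw [dif_neg hcond, List.rdropWhile_concat, if_neg h]

theorem pvNb_nil (s : Int) : pvNb [] s = [] := rfl

theorem pvNb_cons (x : String) (t : List String) (s : Int) :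
    pvNb (x :: t) s = if pvIsBlank x then pvNb t (s + 1) else s :: pvNb t (s + 1) := by
  simp only [pvNb, PySem.List.enumerate_cons, List.filter_cons]
  by_cases h : pvIsBlank x <;> simp [h]

theorem pvNb_append (L M : List String) (s : Int) :
    pvNb (L ++ M) s = pvNb L s ++ pvNb M (s + L.length) := by
  simp [pvNb, PySem.List.enumerate_append]

theorem pvNb_eq_nil (L : List String) (s : Int) :
    pvNb L s = [] ↔ ∀ x ∈ L, pvIsBlank x := by
  induction L generalizing s with
  | nil => simp [pvNb_nil]
  | cons x t ih =>
    rw [pvNb_cons]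
    by_cases h : pvIsBlank x <;> simp [h, ih]

theorem pvNb_getLast (C : List String) (hC : C ≠ []) (hlast : ¬ pvIsBlank (C.getLast hC)) (s : Int) :
    pvNb C s = (pvNb C s).dropLast ++ [s + C.length - 1] := by
  induction C using List.reverseRecOn with
  | nil => simp at hC
  | append_singleton ys a _ =>
    have ha : ¬ pvIsBlank a := by simpa using hlast
    rw [pvNb_append]
    have h1 : pvNb [a] (s + ys.length) = [s + ys.length] := by
      rw [pvNb_cons, if_neg ha, pvNb_nil]
    rw [h1]
    simp
    omega

theorem pvNb_slice (L : List String) (i0 : Int) (r : List Int) (h : pvNb L 0 = i0 :: r) :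
    PySem.List.slice L (some i0) (some ((i0 :: r).getLast (List.cons_ne_nil _ _) + 1)) =
      (L.dropWhile pvIsBlank).rdropWhile pvIsBlank := by
  set p := pvIsBlank with hp
  have hLsplit : L.takeWhile p ++ L.dropWhile p = L := List.takeWhile_append_dropWhile
  set A := L.takeWhile p with hA
  set R := L.dropWhile p with hR
  have hRsplit : R = R.rdropWhile p ++ (R.reverse.takeWhile p).reverse := by
    conv_lhs => rw [← List.reverse_reverse R, ← List.takeWhile_append_dropWhile (p := p) (l := R.reverse)]
    rw [List.reverse_append]
    simp only [List.rdropWhile]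
  set C := R.rdropWhile p with hC
  set B := (R.reverse.takeWhile p).reverse with hB
  have hBall : ∀ b ∈ B, p b := by
    intro b hb
    rw [hB, List.mem_reverse] at hb
    exact List.mem_takeWhile_imp hb
  have hAall : ∀ a ∈ A, p a := fun a ha => List.mem_takeWhile_imp ha
  have hCne : C ≠ [] := by
    intro hnil
    have hRall : ∀ x ∈ R, p x := List.rdropWhile_eq_nil_iff.mp hnil
    have hLall : ∀ x ∈ L, p x := by
      intro x hx
      rw [← hLsplit] at hx
      rcases List.mem_append.mp hx with h' | h'
      · exact hAall x h'
      · exact hRall x h'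
    rw [(pvNb_eq_nil L 0).mpr hLall] at h
    simp at h
  have hlastC : ¬ p (C.getLast hCne) := List.rdropWhile_last_not _ _ hCne
  obtain ⟨hd, tl, hCcons⟩ : ∃ hd tl, C = hd :: tl := List.exists_cons_of_ne_nil hCne
  have hRcons : List.dropWhile p L = hd :: (tl ++ B) := by
    rw [← hR, hRsplit, hCcons]; simp
  have hhd : ¬ p hd := by
    have hne : List.dropWhile p L ≠ [] := by rw [hRcons]; simp
    have h2 := List.head_dropWhile_not p hne
    simp only [hRcons, List.head_cons] at h2
    simp [h2]
  -- pvNb L 0 = pvNb C ↑A.length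
  have hNb : pvNb L 0 = pvNb C (A.length : Int) := by
    conv_lhs => rw [← hLsplit, hRsplit,
      ← List.append_assoc]
    rw [pvNb_append, pvNb_append,
      (pvNb_eq_nil A 0).mpr hAall, (pvNb_eq_nil B _).mpr hBall]
    simp
  rw [hNb, hCcons, pvNb_cons, if_neg (by simpa using hhd)] at h
  have hi0 : i0 = (A.length : Int) := (List.cons.inj h).1.symm
  have hcons2 : ((A.length : Int)) :: pvNb tl ((A.length : Int) + 1) = pvNb (hd :: tl) (A.length : Int) := by
    rw [pvNb_cons, if_neg (by simpa using hhd)]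
  have hg := pvNb_getLast (hd :: tl) (List.cons_ne_nil _ _)
      (by simp only [← hCcons]; exact hlastC) (A.length : Int)
  have h9 : (i0 :: r).getLast? = some ((A.length : Int) + (hd :: tl).length - 1) := by
    rw [← h, hcons2, hg, List.getLast?_concat]
  have hlast : (i0 :: r).getLast (List.cons_ne_nil _ _) = (A.length : Int) + (hd :: tl).length - 1 := by
    have h10 := List.getLast?_eq_some_getLast (l := i0 :: r) (List.cons_ne_nil _ _)
    rw [h10] at h9
    exact Option.some.inj h9
  rw [hlast, hi0]
  have hbound : (A.length : Int) + (hd :: tl).length - 1 + 1 = (A.length : Int) + (((hd :: tl).length : Nat) : Int) := by ring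
  rw [hbound, PySem.List.slice_natCast_add]
  conv_lhs => rw [← hLsplit, hRsplit, hCcons, ← List.append_assoc, ← hCcons]
  rw [show A ++ C ++ B = A ++ (C ++ B) from List.append_assoc _ _ _, List.drop_left]
  rw [hCcons, List.take_left]
-- ===== VERDICT (by name: the statement is the Claim_ definition above) =====
theorem extract_ctor_body_lines_spec : Claim_equal_extract_ctor_body_lines := by
  intro lines ctor_start ctor_end _
  show extract_ctor_body_lines lines ctor_start ctor_end = extract_ctor_body_lines_alt lines ctor_start ctor_end
  simp only [extract_ctor_body_lines, extract_ctor_body_lines_alt]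
  set cs := (PySem.Str.join "\n" (PySem.List.slice lines (some ctor_start) (some (ctor_end + 1)))).toList with hcs
  rw [pvFindBraceB_eq cs 0 0]
  cases hbr : pvFindBraceA cs 0 0 with
  | none => rfl
  | some bp =>
    simp only []
    obtain ⟨-, hdrop⟩ := pvFindBraceA_drop cs 0 0 bp hbr
    simp only [Nat.sub_zero] at hdrop
    have hbp : bp < cs.length := by
      by_contra hle
      rw [List.drop_eq_nil_of_le (by omega)] at hdrop
      simp at hdrop
    obtain ⟨b', hbd⟩ := pvBdTail_drop cs 0 bp (by omega)
    have hgetD : ((0 : Int) :: pvBdTail cs 0).getD bp 0 = b' := by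
      rw [List.getD_eq_getElem?_getD, ← List.head?_drop, hbd]
      rfl
    have hdrop1 : ((0 : Int) :: pvBdTail cs 0).drop (bp + 1) = pvBdTail (cs.drop bp) b' := by
      rw [← List.tail_drop, hbd, List.tail_cons]
    have hclose : pvFindEqB (((0 : Int) :: pvBdTail cs 0).getD bp 0) (((0 : Int) :: pvBdTail cs 0).drop (bp + 1)) bp
        = pvFindCloseA (cs.drop bp) bp 0 := by
      rw [hgetD, hdrop1, show cs.drop bp = '{' :: cs.drop (bp + 1) from hdrop]
      simp only [pvBdTail, pvFindEqB, pvFindCloseA, Char.reduceEq, reduceIte]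
      rw [if_neg (show ¬(b' + 1 - (0 : Int) = b') by omega)]
      have happ := pvFindEqB_eq (cs.drop (bp + 1)) (bp + 1) 1 (b' + 1 - 0) (le_refl 1)
      rw [show b' + 1 - (0 : Int) - 1 = b' from by ring] at happ
      rw [happ]
      norm_num
    rw [hclose]
    cases hcl : pvFindCloseA (cs.drop bp) bp 0 with
    | none => rfl
    | some ep =>
      simp only []
      rw [pvTrimFrontA_eq, pvTrimBackA_eq]
      set L := (PySem.Chars.splitOn (PySem.List.slice cs (some ((bp : Int) + 1)) (some (ep : Int))) ['\n']).map String.ofList with hL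
      cases hnb : pvNb L 0 with
      | nil =>
        simp only []
        have hall : ∀ x ∈ L, pvIsBlank x := (pvNb_eq_nil L 0).mp hnb
        rw [List.dropWhile_eq_nil_iff.mpr (fun x hx => hall x hx), List.rdropWhile_nil]
      | cons i0 rest =>
        simp only []
        exact (pvNb_slice L i0 rest hnb).symm
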